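-- pv_equiv track=rewrite | github.com/krzyssikora/advent_of_code | aoc_2024/19_towels.py | possible_designs
-- ===== SOURCE A (Python) =====
-- def possible_designs(patterns, designs):
--     designs_number = 0
--     possible_ways = 0
--     cache = {}
--     for idx, design in enumerate(designs, 1):
--         if number := number_of_ways(patterns, design, cache):
--             designs_number += 1
--             possible_ways += number
--     return designs_number, possible_ways
--
-- def number_of_ways(patterns, design, cache=None):
--     if cache is None:
--         cache = {}
--     if design in cache:
--         return cache[design]
--     number = 0
--     if design == "":
--         number = 1
--     for pattern in patterns:
--         if design.startswith(pattern):
--             number += number_of_ways(patterns, design[len(pattern):], cache)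
--     cache[design] = number
--     return number
-- ===== SOURCE B (Python) =====
-- def possible_designs(patterns, designs):
--     designs_number = 0
--     possible_ways = 0
--     for design in designs:
--         ways = _ways_count(patterns, design)
--         if ways:
--             designs_number += 1
--             possible_ways += ways
--     return designs_number, possible_ways
--
--
-- def _ways_count(patterns, design):
--     """Number of ways to build design by concatenating patterns, by a bottom-up
--     DP over suffix positions. An empty pattern is rejected: it could be used any
--     number of times, so the number of decompositions diverges."""
--     if "" in patterns:
--         raise ValueError("empty pattern: the number of decompositions diverges")
--     n = len(design)
--     ways = [0] * (n + 1)
--     ways[n] = 1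
--     for i in reversed(range(n)):
--         ways[i] = sum(ways[i + len(p)] for p in patterns if design.startswith(p, i))
--     return ways[0]
-- ===== Notes on version B (the rewrite author's own statement) =====
-- stated objective: alternative
-- what changed: Replaces the top-down memoized recursion with a shared string-keyed cache by an iterative bottom-up 1D DP over each design's suffix positions (ways[i] summed from ways[i+len(p)]); an empty pattern, on which A's recursion blows the stack, is rejected with ValueError.
import Mathlib
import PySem

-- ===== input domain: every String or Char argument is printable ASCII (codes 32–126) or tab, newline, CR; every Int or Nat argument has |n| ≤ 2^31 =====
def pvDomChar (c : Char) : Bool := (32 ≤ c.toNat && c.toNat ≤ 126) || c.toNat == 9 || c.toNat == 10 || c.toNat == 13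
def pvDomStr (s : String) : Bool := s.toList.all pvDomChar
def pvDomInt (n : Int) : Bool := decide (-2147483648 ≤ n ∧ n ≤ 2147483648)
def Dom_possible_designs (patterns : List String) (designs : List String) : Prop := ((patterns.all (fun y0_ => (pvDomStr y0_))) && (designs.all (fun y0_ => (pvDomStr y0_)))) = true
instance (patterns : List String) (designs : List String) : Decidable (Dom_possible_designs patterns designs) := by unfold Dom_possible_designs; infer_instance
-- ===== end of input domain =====

-- B replaces A's top-down memoized recursion (shared string-keyed cache) by a bottom-up 1D DP
-- over each design's suffix positions; objective: alternative (similar cost, different decomposition).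
-- Where A hits RecursionError ("" among patterns, designs nonempty) B raises ValueError instead;
-- Pre_ excludes exactly those inputs.

-- ===== PORT A =====
-- number_of_ways: the fuel argument only bounds the recursion depth (Python has no fuel and
-- instead recurses; under Pre_ the depth from a design is at most |design|+1, so the
-- fuel-exhausted branch is never reached on admitted inputs).
def numberOfWays (patterns : List String) : Nat → String → PySem.Dict String Int → Int × PySem.Dict String Int
  | 0, _, cache => (0, cache)
  | fuel+1, design, cache =>
    match cache.get? design with
    | some v => (v, cache)
    | none =>
      let st := patterns.foldl
        (fun (st : Int × PySem.Dict String Int) pattern =>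
          if PySem.Str.startswith design pattern then
            let r := numberOfWays patterns fuel (PySem.Str.slice design (some (PySem.Str.len pattern)) none) st.2
            (st.1 + r.1, r.2)
          else st)
        ((if design = "" then (1 : Int) else 0), cache)
      (st.1, st.2.insert design st.1)

-- the loop variable idx of A's enumerate(designs, 1) is unused, so the fold is over designs alone
def possible_designs (patterns : List String) (designs : List String) : Int × Int :=
  (designs.foldl
    (fun (st : (Int × Int) × PySem.Dict String Int) design =>
      let r := numberOfWays patterns (design.toList.length + 1) design st.2
      if r.1 ≠ 0 then ((st.1.1 + 1, st.1.2 + r.1), r.2) else (st.1, r.2))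
    ((0, 0), PySem.Dict.empty)).1

-- ===== PORT B =====
-- sum(ways[i + len(p)] for p in patterns if design.startswith(p, i)); design.startswith(p, i) is
-- ported by hand as startswith of the slice design[i:], exact for 0 ≤ i; whenever the test holds,
-- i + len(p) ≤ len(design) so the index is in bounds and getD's default is never read
def dpCell (patterns : List String) (design : String) (ways : List Int) (i : Nat) : Int :=
  patterns.foldl
    (fun s p =>
      if PySem.Str.startswith (PySem.Str.slice design (some (i : Int)) none) p then
        s + ways.getD (i + p.toList.length) 0
      else s)
    0

-- for i in reversed(range(n)): ways[i] = dpCell …  (i runs n-1, …, 0)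
def dpLoop (patterns : List String) (design : String) : Nat → List Int → List Int
  | 0, ways => ways
  | i+1, ways => dpLoop patterns design i (ways.set i (dpCell patterns design ways i))

-- _ways_count; its ValueError guard ("" among patterns) fires only outside Pre_possible_designs,
-- so the port carries no guard and returns the unguarded DP value there
def waysCount (patterns : List String) (design : String) : Int :=
  let n := design.toList.length
  let ways := dpLoop patterns design n ((List.replicate (n + 1) (0 : Int)).set n 1)
  ways.getD 0 0    -- ways[0]; the list has length n+1 ≥ 1

def possible_designs_alt (patterns : List String) (designs : List String) : Int × Int :=
  designs.foldl
    (fun (acc : Int × Int) design =>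
      let w := waysCount patterns design
      if w ≠ 0 then (acc.1 + 1, acc.2 + w) else acc)
    (0, 0)

-- ===== PRECONDITION & SPEC =====
-- Pre_ excludes exactly the inputs where both Pythons raise: with "" among the patterns and at
-- least one design, A's number_of_ways recurses forever on the unchanged design (RecursionError)
-- and B's _ways_count rejects the empty pattern (ValueError: the way-count diverges).
def Pre_possible_designs (patterns : List String) (designs : List String) : Prop :=
  (∀ p ∈ patterns, p.toList ≠ []) ∨ designs = []
instance (patterns : List String) (designs : List String) : Decidable (Pre_possible_designs patterns designs) := by unfold Pre_possible_designs; infer_instance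

def pvWitness_possible_designs : List String × List String := (["ab", "a"], ["aab", ""])

def Spec_possible_designs (patterns : List String) (designs : List String) (out : Int × Int) : Prop := out = possible_designs_alt patterns designs
instance (patterns : List String) (designs : List String) (out : Int × Int) : Decidable (Spec_possible_designs patterns designs out) := by unfold Spec_possible_designs; infer_instance

-- ===== CLAIM (what is proved, stated in full; the proofs are below) =====
def Claim_equal_possible_designs : Prop := ∀ (patterns : List String) (designs : List String), Dom_possible_designs patterns designs → Pre_possible_designs patterns designs → Spec_possible_designs patterns designs (possible_designs patterns designs)

-- ===== LEMMAS AND PROOFS =====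

-- the common reference: the towel-counting recurrence, by fuel (no cache)
def pvR (patterns : List String) : Nat → String → Int
  | 0, _ => 0
  | f+1, s => patterns.foldl
      (fun a p =>
        if PySem.Str.startswith s p then
          a + pvR patterns f (PySem.Str.slice s (some (PySem.Str.len p)) none)
        else a)
      (if s = "" then (1 : Int) else 0)

-- every cached value is the reference value of its key
def GoodCache (patterns : List String) (c : PySem.Dict String Int) : Prop :=
  ∀ k v, c.get? k = some v → v = pvR patterns (k.toList.length + 1) k

lemma toList_slice_len (s p : String) :
    (PySem.Str.slice s (some (PySem.Str.len p)) none).toList = s.toList.drop p.toList.length := by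
  simp [PySem.Str.toList_slice, PySem.Str.len_eq, PySem.Chars.slice_eq_listSlice,
    PySem.List.slice_from_natCast]


lemma sw_facts {s p : String} (hp : p.toList ≠ []) (h : PySem.Str.startswith s p = true) :
    1 ≤ p.toList.length ∧ p.toList.length ≤ s.toList.length := by
  rw [PySem.Str.startswith_eq, PySem.Chars.startswith_iff] at h
  have h2 := h.length_le
  have := List.length_pos_of_ne_nil hp
  omega


lemma pvR_stable (patterns : List String) (hp : ∀ p ∈ patterns, p.toList ≠ []) :
    ∀ f g s, s.toList.length < f → s.toList.length < g → pvR patterns f s = pvR patterns g s := by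
  intro f
  induction f with
  | zero => intro g s hf; omega
  | succ f ih =>
    intro g s hf hg
    obtain ⟨g', rfl⟩ : ∃ g', g = g' + 1 := ⟨g - 1, by omega⟩
    show pvR patterns (f+1) s = pvR patterns (g'+1) s
    simp only [pvR]
    apply PySem.List.foldl_congr_mem
    intro acc p hpmem
    by_cases hsw : PySem.Str.startswith s p = true
    · have hpne : p.toList ≠ [] := hp p hpmem
      obtain ⟨h1, h2⟩ := sw_facts hpne hsw
      have hlen : (PySem.Str.slice s (some (PySem.Str.len p)) none).toList.length
          = s.toList.length - p.toList.length := by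
        rw [toList_slice_len]; simp
      rw [hsw]
      simp only [reduceIte]
      rw [ih g' _ (by omega) (by omega)]
    · rw [Bool.not_eq_true] at hsw
      rw [hsw]
      simp


lemma nw_correct (patterns : List String) (hp : ∀ p ∈ patterns, p.toList ≠ []) :
    ∀ f s c, s.toList.length < f → GoodCache patterns c →
      (numberOfWays patterns f s c).1 = pvR patterns (s.toList.length + 1) s ∧
      GoodCache patterns (numberOfWays patterns f s c).2 := by
  intro f
  induction f with
  | zero => intro s c h; omega
  | succ f ih =>
    intro s c hlt hc
    simp only [numberOfWays]
    cases hget : c.get? s with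
    | some v =>
      exact ⟨hc s v hget, hc⟩
    | none =>
      have aux : ∀ (l : List String), (∀ p ∈ l, p ∈ patterns) →
          ∀ (a : Int) (c' : PySem.Dict String Int), GoodCache patterns c' →
          (l.foldl
            (fun (st : Int × PySem.Dict String Int) pattern =>
              if PySem.Str.startswith s pattern then
                let r := numberOfWays patterns f (PySem.Str.slice s (some (PySem.Str.len pattern)) none) st.2
                (st.1 + r.1, r.2)
              else st) (a, c')).1
            = l.foldl (fun b p =>
                if PySem.Str.startswith s p then
                  b + pvR patterns s.toList.length (PySem.Str.slice s (some (PySem.Str.len p)) none)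
                else b) a
          ∧ GoodCache patterns (l.foldl
            (fun (st : Int × PySem.Dict String Int) pattern =>
              if PySem.Str.startswith s pattern then
                let r := numberOfWays patterns f (PySem.Str.slice s (some (PySem.Str.len pattern)) none) st.2
                (st.1 + r.1, r.2)
              else st) (a, c')).2 := by
        intro l
        induction l with
        | nil => intro _ a c' hc'; exact ⟨rfl, hc'⟩
        | cons p t iht =>
          intro hsub a c' hc'
          by_cases hsw : PySem.Str.startswith s p = true
          · have hpmem := hsub p (List.mem_cons_self ..)
            have hpne : p.toList ≠ [] := hp p hpmem
            obtain ⟨h1, h2⟩ := sw_facts hpne hsw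
            have hlen : (PySem.Str.slice s (some (PySem.Str.len p)) none).toList.length
                = s.toList.length - p.toList.length := by
              rw [toList_slice_len]; simp
            have hr := ih (PySem.Str.slice s (some (PySem.Str.len p)) none) c' (by omega) hc'
            have hv : (numberOfWays patterns f (PySem.Str.slice s (some (PySem.Str.len p)) none) c').1
                = pvR patterns s.toList.length (PySem.Str.slice s (some (PySem.Str.len p)) none) := by
              rw [hr.1]
              exact pvR_stable patterns hp _ _ _ (by omega) (by omega)
            simp only [List.foldl_cons, hsw, if_true]
            rw [hv]
            exact iht (fun q hq => hsub q (List.mem_cons_of_mem _ hq)) _ _ hr.2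
          · rw [Bool.not_eq_true] at hsw
            simp only [List.foldl_cons, hsw, Bool.false_eq_true, if_false]
            exact iht (fun q hq => hsub q (List.mem_cons_of_mem _ hq)) a c' hc'
      obtain ⟨ha, hg⟩ := aux patterns (fun p h => h) (if s = "" then (1 : Int) else 0) c hc
      refine ⟨?_, ?_⟩
      · dsimp only
        rw [ha]
        conv_rhs => rw [pvR]
      · dsimp only
        intro k v hkv
        by_cases hks : k = s
        · subst hks
          rw [PySem.Dict.get?_insert_self] at hkv
          rw [← Option.some.inj hkv, ha]
          conv_rhs => rw [pvR]
        · rw [PySem.Dict.get?_insert_of_ne _ _ hks] at hkv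
          exact hg k v hkv


lemma toList_slice_nat (s : String) (j : Nat) :
    (PySem.Str.slice s (some (j : Int)) none).toList = s.toList.drop j := by
  simp [PySem.Str.toList_slice, PySem.Chars.slice_eq_listSlice, PySem.List.slice_from_natCast]


lemma slice_comp (s : String) (i : Nat) (p : String) :
    PySem.Str.slice (PySem.Str.slice s (some (i : Int)) none) (some (PySem.Str.len p)) none
      = PySem.Str.slice s (some ((i + p.toList.length : Nat) : Int)) none := by
  apply String.toList_inj.mp
  rw [toList_slice_len, toList_slice_nat, toList_slice_nat, List.drop_drop]


lemma slice_empty_iff (s : String) (j : Nat) :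
    PySem.Str.slice s (some (j : Int)) none = "" ↔ s.toList.length ≤ j := by
  rw [← String.toList_inj, toList_slice_nat]
  simp [List.drop_eq_nil_iff]


lemma pvR_empty (patterns : List String) (hp : ∀ p ∈ patterns, p.toList ≠ []) (f : Nat) :
    pvR patterns (f + 1) "" = 1 := by
  simp only [pvR]
  have hcg : ∀ (acc : Int), ∀ p ∈ patterns,
      (if PySem.Str.startswith "" p then
        acc + pvR patterns f (PySem.Str.slice "" (some (PySem.Str.len p)) none)
      else acc) = acc := by
    intro acc p hpmem
    have hpne : p.toList ≠ [] := hp p hpmem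
    have : PySem.Str.startswith "" p = false := by
      rw [← Bool.not_eq_true, PySem.Str.startswith_eq, PySem.Chars.startswith_iff]
      intro hpre
      exact hpne (List.eq_nil_of_prefix_nil (by simpa using hpre))
    rw [this]
    simp
  rw [PySem.List.foldl_congr_mem patterns _ (fun a _ => a) _ hcg, List.foldl_fixed]
  simp


lemma dpCell_val (patterns : List String) (hp : ∀ p ∈ patterns, p.toList ≠ []) (design : String) (i : Nat)
    (ways : List Int) (hi : i < design.toList.length)
    (hinv : ∀ j, i + 1 ≤ j → j ≤ design.toList.length →
      ways.getD j 0 = pvR patterns (design.toList.length - j + 1)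
        (PySem.Str.slice design (some ((j : Nat) : Int)) none)) :
    dpCell patterns design ways i = pvR patterns (design.toList.length - i + 1)
      (PySem.Str.slice design (some ((i : Nat) : Int)) none) := by
  obtain ⟨m, hm⟩ : ∃ m, design.toList.length - i = m + 1 := ⟨design.toList.length - i - 1, by omega⟩
  rw [hm, pvR]
  have hsfxlen : (PySem.Str.slice design (some (i : Int)) none).toList.length
      = design.toList.length - i := by
    rw [toList_slice_nat, List.length_drop]
  have hne : ¬ (PySem.Str.slice design (some (i : Int)) none = "") := by
    rw [slice_empty_iff]; omega
  rw [if_neg hne]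
  unfold dpCell
  apply PySem.List.foldl_congr_mem
  intro acc p hpmem
  by_cases hsw : PySem.Str.startswith (PySem.Str.slice design (some (i : Int)) none) p = true
  · have hpne : p.toList ≠ [] := hp p hpmem
    obtain ⟨h1, h2⟩ := sw_facts hpne hsw
    rw [hsfxlen] at h2
    rw [hsw]
    simp only [if_true]
    congr 1
    rw [hinv (i + p.toList.length) (by omega) (by omega), slice_comp]
    have hL : (PySem.Str.slice design (some ((i + p.toList.length : Nat) : Int)) none).toList.length
        = design.toList.length - (i + p.toList.length) := by
      rw [toList_slice_nat, List.length_drop]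
    apply pvR_stable patterns hp <;> omega
  · rw [Bool.not_eq_true] at hsw
    rw [hsw]
    simp


lemma dpLoop_correct (patterns : List String) (hp : ∀ p ∈ patterns, p.toList ≠ []) (design : String) :
    ∀ i ways, i ≤ design.toList.length → ways.length = design.toList.length + 1 →
      (∀ j, i ≤ j → j ≤ design.toList.length →
        ways.getD j 0 = pvR patterns (design.toList.length - j + 1)
          (PySem.Str.slice design (some ((j : Nat) : Int)) none)) →
      (∀ j, j ≤ design.toList.length →
        (dpLoop patterns design i ways).getD j 0 = pvR patterns (design.toList.length - j + 1)
          (PySem.Str.slice design (some ((j : Nat) : Int)) none)) := by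
  intro i
  induction i with
  | zero =>
    intro ways _ _ hinv j hj
    exact hinv j (Nat.zero_le j) hj
  | succ i ih =>
    intro ways hi hlen hinv
    simp only [dpLoop]
    apply ih _ (by omega) (by simp [hlen])
    intro j hij hjn
    by_cases hji : j = i
    · subst hji
      have hval := dpCell_val patterns hp design j ways (by omega)
        (fun k hk1 hk2 => hinv k hk1 hk2)
      rw [← hval]
      simp [List.getD, (by omega : j < ways.length)]
    · rw [List.getD, List.getElem?_set_ne (by omega : i ≠ j), ← List.getD]
      exact hinv j (by omega) hjn


lemma alt_design_val (patterns : List String) (hp : ∀ p ∈ patterns, p.toList ≠ []) (design : String) :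
    (dpLoop patterns design design.toList.length
        ((List.replicate (design.toList.length + 1) (0 : Int)).set design.toList.length 1)).getD 0 0
      = pvR patterns (design.toList.length + 1) design := by
  have h0 := dpLoop_correct patterns hp design design.toList.length
    ((List.replicate (design.toList.length + 1) (0 : Int)).set design.toList.length 1)
    (le_refl _) (by simp)
    (by
      intro j hj1 hj2
      have hjn : j = design.toList.length := by omega
      have hsfx : PySem.Str.slice design (some ((j : Nat) : Int)) none = "" := by
        rw [slice_empty_iff]; omega
      rw [hsfx]
      have h1 : design.toList.length - j + 1 = 0 + 1 := by omega
      rw [h1, pvR_empty patterns hp]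
      rw [List.getD, hjn, List.getElem?_set_self']
      simp)
    0 (Nat.zero_le _)
  rw [h0]
  have hd : PySem.Str.slice design (some ((0 : Nat) : Int)) none = design := by
    apply String.toList_inj.mp
    rw [toList_slice_nat]
    rfl
  rw [hd]
  congr 1

-- the two design folds agree, threading A's cache invariant
lemma main_fold (patterns : List String) (hp : ∀ p ∈ patterns, p.toList ≠ []) :
    ∀ (ds : List String) (acc : Int × Int) (c : PySem.Dict String Int), GoodCache patterns c →
      (ds.foldl
        (fun (st : (Int × Int) × PySem.Dict String Int) design =>
          let r := numberOfWays patterns (design.toList.length + 1) design st.2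
          if r.1 ≠ 0 then ((st.1.1 + 1, st.1.2 + r.1), r.2) else (st.1, r.2))
        (acc, c)).1
      = ds.foldl
        (fun (acc : Int × Int) design =>
          let w := waysCount patterns design
          if w ≠ 0 then (acc.1 + 1, acc.2 + w) else acc)
        acc := by
  intro ds
  induction ds with
  | nil => intro acc c _; rfl
  | cons d t ih =>
    intro acc c hc
    have hA := nw_correct patterns hp (d.toList.length + 1) d c (by omega) hc
    have hB : waysCount patterns d = pvR patterns (d.toList.length + 1) d := by
      unfold waysCount
      exact alt_design_val patterns hp d
    simp only [List.foldl_cons]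
    rw [hA.1, hB]
    by_cases hz : pvR patterns (d.toList.length + 1) d ≠ 0
    · simp only [if_pos hz]
      exact ih _ _ hA.2
    · simp only [if_neg hz]
      exact ih _ _ hA.2

-- ===== VERDICT (by name: the statement is the Claim_ definition above) =====
theorem possible_designs_spec : Claim_equal_possible_designs := by
  intro patterns designs _ hpre
  unfold Spec_possible_designs possible_designs possible_designs_alt
  rcases hpre with hp | hd
  · exact main_fold patterns hp designs (0, 0) PySem.Dict.empty
      (fun k v h => by simp [PySem.Dict.get?_empty] at h)
  · subst hd; rfl
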